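-- pv_equiv track=rewrite | github.com/atalhassan/Data_Classifier | ensemble_classifier.py | attribute_frequencies
-- ===== SOURCE A (Python) =====
-- def attribute_frequencies(instances, att_index, class_index):
--     # get unique list of attribute and class values
--     att_vals = list(set(get_column(instances, att_index)))
--     class_vals = list(set(get_column(instances, class_index)))
--     # initialize the result
--     result = {v: [{c: 0 for c in class_vals}, 0] for v in att_vals} # build up the frequencies
--     for row in instances:
--         label = row[class_index]
--         att_val = row[att_index]
--         result[att_val][0][label] += 1
--         result[att_val][1] += 1
--     return result
--
-- def get_column(table,index):
--     val = []
--     for row in table: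
--         val.append(row[index])
--     return val
-- ===== SOURCE B (Python) =====
-- def attribute_frequencies(instances, att_index, class_index):
--     # unique attribute and class values, as in A
--     att_vals = list(set(row[att_index] for row in instances))
--     class_vals = list(set(row[class_index] for row in instances))
--     # build the result directly: per attribute value, count by scanning
--     return {v: [{c: sum(1 for row in instances
--                         if row[att_index] == v and row[class_index] == c)
--                  for c in class_vals},
--                 sum(1 for row in instances if row[att_index] == v)]
--             for v in att_vals}
-- ===== Notes on version B (the rewrite author's own statement) =====
-- stated objective: alternative
-- what changed: A initializes a zeroed nested dict and mutates it in one counting pass over the rows; B has no mutable accumulator at all and builds the result in a single dict comprehension, computing each count by a direct scan (sum of matches) per attribute/class value pair.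
import Mathlib
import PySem

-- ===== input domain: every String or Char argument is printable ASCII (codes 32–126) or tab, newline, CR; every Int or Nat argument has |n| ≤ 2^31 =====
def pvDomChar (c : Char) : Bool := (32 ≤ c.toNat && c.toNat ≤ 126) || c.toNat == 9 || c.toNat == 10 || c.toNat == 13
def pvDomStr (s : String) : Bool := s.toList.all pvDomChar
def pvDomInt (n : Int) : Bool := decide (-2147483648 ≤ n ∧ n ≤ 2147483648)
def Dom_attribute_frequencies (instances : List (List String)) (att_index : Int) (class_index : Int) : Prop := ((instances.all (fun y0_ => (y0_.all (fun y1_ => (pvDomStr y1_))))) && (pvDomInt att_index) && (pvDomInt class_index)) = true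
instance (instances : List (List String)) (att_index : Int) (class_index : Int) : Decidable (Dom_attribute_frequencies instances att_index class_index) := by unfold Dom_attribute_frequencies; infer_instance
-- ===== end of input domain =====

-- B replaces A's mutate-a-zeroed-nested-dict counting pass by a direct dict comprehension
-- that counts each (attribute value, class value) pair with its own scan (objective: alternative).


-- ===== PORT A =====
-- row[i]; the "" default is never reached under Pre_ (Python raises IndexError there)
def pvGetS (row : List String) (i : Int) : String := (PySem.List.pyGet? row i).getD ""

def pv_get_column (table : List (List String)) (index : Int) : List String :=
  table.foldl (fun val row => val ++ [pvGetS row index]) []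

def attribute_frequencies (instances : List (List String)) (att_index : Int) (class_index : Int) : List (String × (List (String × Int)) × Int) :=
  let att_vals : List String := PySem.Set.ofList (pv_get_column instances att_index)
  let class_vals : List String := PySem.Set.ofList (pv_get_column instances class_index)
  let inner0 : PySem.Dict String Int × Int := (PySem.Dict.mk (class_vals.map (fun c => (c, (0:Int)))), 0)
  let init : PySem.Dict String (PySem.Dict String Int × Int) :=
    PySem.Dict.mk (att_vals.map (fun v => (v, inner0)))
  -- loop: result[att_val][0][label] += 1 ; result[att_val][1] += 1
  -- (modify's default inner0 is never consulted under Pre_: att_val is always a key)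
  let result := instances.foldl (fun res row =>
      res.modify (pvGetS row att_index) inner0
        (fun p => (p.1.modify (pvGetS row class_index) 0 (· + 1), p.2 + 1))) init
  result.items.map (fun p => (p.1, (p.2.1.items, p.2.2)))

-- ===== PORT B =====
def attribute_frequencies_alt (instances : List (List String)) (att_index : Int) (class_index : Int) : List (String × (List (String × Int)) × Int) :=
  let att_vals : List String := PySem.Set.ofList (instances.map (fun row => (PySem.List.pyGet? row att_index).getD ""))
  let class_vals : List String := PySem.Set.ofList (instances.map (fun row => (PySem.List.pyGet? row class_index).getD ""))
  att_vals.map (fun v =>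
    (v, (class_vals.map (fun c =>
           (c, ((instances.countP (fun row => (PySem.List.pyGet? row att_index).getD "" == v && (PySem.List.pyGet? row class_index).getD "" == c) : Nat) : Int))),
         ((instances.countP (fun row => (PySem.List.pyGet? row att_index).getD "" == v) : Nat) : Int))))

-- ===== PRECONDITION & SPEC =====
-- Pre_ excludes exactly the inputs where Python A raises IndexError: a row too short for att_index or class_index.
def Pre_attribute_frequencies (instances : List (List String)) (att_index : Int) (class_index : Int) : Prop :=
  ∀ row ∈ instances, PySem.Raise.InRange row.length att_index ∧ PySem.Raise.InRange row.length class_index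
instance (instances : List (List String)) (att_index : Int) (class_index : Int) : Decidable (Pre_attribute_frequencies instances att_index class_index) := by unfold Pre_attribute_frequencies; infer_instance

def pvWitness_attribute_frequencies : List (List String) × Int × Int := ([["a","x"],["b","y"],["a","x"]], 0, 1)

def Spec_attribute_frequencies (instances : List (List String)) (att_index : Int) (class_index : Int) (out : List (String × (List (String × Int)) × Int)) : Prop := out = attribute_frequencies_alt instances att_index class_index
instance (instances : List (List String)) (att_index : Int) (class_index : Int) (out : List (String × (List (String × Int)) × Int)) : Decidable (Spec_attribute_frequencies instances att_index class_index out) := by unfold Spec_attribute_frequencies; infer_instance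

-- ===== CLAIM (what is proved, stated in full; the proofs are below) =====
def Claim_equal_attribute_frequencies : Prop := ∀ (instances : List (List String)) (att_index : Int) (class_index : Int), Dom_attribute_frequencies instances att_index class_index → Pre_attribute_frequencies instances att_index class_index → Spec_attribute_frequencies instances att_index class_index (attribute_frequencies instances att_index class_index)

-- ===== LEMMAS AND PROOFS =====

-- Set.update adds nothing when every element is already present
theorem pv_update_of_subset {α : Type} [BEq α] [LawfulBEq α] (l : List α) (s : PySem.Set α)
    (h : ∀ x ∈ l, x ∈ s) : PySem.Set.update s l = s := by
  induction l generalizing s with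
  | nil => rfl
  | cons x l ih =>
    have hx : s.contains x = true := by
      simpa using h x (by simp)
    show PySem.Set.update (PySem.Set.add s x) l = s
    rw [PySem.Set.add, if_pos hx]
    exact ih s (fun y hy => h y (by simp [hy]))

-- getD after a keyed modify-fold with row-independent updates: only the matching rows act
theorem pv_getD_foldl_modify {α ν : Type} (l : List α) (key : α → String) (F : α → ν → ν)
    (d0 : ν) (d : PySem.Dict String ν) (v : String) :
    (l.foldl (fun d x => d.modify (key x) d0 (F x)) d).getD v d0
      = (l.filter (fun x => key x == v)).foldl (fun acc x => F x acc) (d.getD v d0) := by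
  induction l generalizing d with
  | nil => rfl
  | cons x l ih =>
    simp only [List.foldl_cons, List.filter_cons]
    rw [ih]
    by_cases hxv : key x = v
    · simp [hxv, PySem.Dict.modify]
    · have : (key x == v) = false := by simp [hxv]
      simp [this, PySem.Dict.modify, PySem.Dict.getD_insert, Ne.symm hxv]

-- getD with the common value of a constant-valued literal dict is that value
theorem pv_getD_const {ν : Type} (l : List String) (c : ν) (v : String) :
    (PySem.Dict.mk (l.map (fun a => (a, c)))).getD v c = c := by
  induction l with
  | nil => rfl
  | cons a l ih =>
    by_cases hav : a = v <;>
      simp_all [PySem.Dict.getD, PySem.Dict.get?]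

theorem pv_foldl_add_one {α : Type} (l : List α) (a : Int) :
    l.foldl (fun n _ => n + 1) a = a + l.length := by
  induction l generalizing a with
  | nil => simp
  | cons x l ih => simp [ih]; omega

theorem pv_count_map (l : List (List String)) (h : List String → String) (c : String) :
    List.count c (l.map h) = l.countP (fun a => h a == c) := by
  induction l with
  | nil => rfl
  | cons x l ih =>
    by_cases hc : h x = c <;> simp [hc, ih]

-- ===== VERDICT (by name: the statement is the Claim_ definition above) =====
theorem attribute_frequencies_spec : Claim_equal_attribute_frequencies := by
  intro instances att_index class_index _hdom _hpre
  show _ = _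
  unfold attribute_frequencies attribute_frequencies_alt
  simp only [pv_get_column, PySem.List.foldl_append_singleton_eq_map, List.nil_append]
  set gA := fun row : List String => pvGetS row att_index with hgA
  set gC := fun row : List String => pvGetS row class_index with hgC
  set att_vals : List String := PySem.Set.ofList (instances.map gA) with hav
  set class_vals : List String := PySem.Set.ofList (instances.map gC) with hcv
  set inner0 : PySem.Dict String Int × Int := (PySem.Dict.mk (class_vals.map (fun c => (c, (0:Int)))), 0) with hinner0
  set init : PySem.Dict String (PySem.Dict String Int × Int) := PySem.Dict.mk (att_vals.map (fun v => (v, inner0))) with hinit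
  set result := instances.foldl (fun res row => res.modify (gA row) inner0
      (fun p => (p.1.modify (gC row) 0 (· + 1), p.2 + 1))) init with hres
  -- keys of the result dict are exactly att_vals
  have hkeys : result.keys = att_vals := by
    rw [hres, PySem.Dict.keys_foldl_modify_key instances gA inner0 (fun _ row p => (p.1.modify (gC row) 0 (· + 1), p.2 + 1)) init]
    have : init.keys = att_vals := by simp [hinit, PySem.Dict.keys, Function.comp_def]
    rw [this]
    exact pv_update_of_subset _ _ (fun x hx => by
      simpa [hav] using (PySem.Set.mem_ofList (instances.map gA) x).mpr hx)
  have hnd : result.keys.Nodup := by rw [hkeys]; exact PySem.Set.nodup_ofList _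
  rw [PySem.Dict.items_eq_map_keys result hnd inner0, hkeys, List.map_map]
  apply List.map_congr_left
  intro v _
  simp only [Function.comp_apply]
  -- the value stored at v, split into its two components
  have hvval : result.getD v inner0
      = ((instances.filter (fun row => gA row == v)).foldl
          (fun dc row => dc.modify (gC row) 0 (· + 1)) inner0.1,
         (0 : Int) + (instances.filter (fun row => gA row == v)).length) := by
    rw [hres, pv_getD_foldl_modify instances gA (fun row p => (p.1.modify (gC row) 0 (· + 1), p.2 + 1)) inner0 init v]
    have h0 : init.getD v inner0 = inner0 := pv_getD_const _ _ _
    rw [h0]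
    exact (PySem.List.foldl_prod_mk (fun dc (r : List String) => PySem.Dict.modify dc (gC r) 0 (· + 1))
      (fun (n : Int) (_ : List String) => n + 1) _ inner0.1 inner0.2).trans (by rw [pv_foldl_add_one])
  set filtered := instances.filter (fun row => gA row == v) with hfil
  -- the inner dict's items
  have hinkeys : ((filtered.foldl (fun dc row => dc.modify (gC row) 0 (· + 1)) inner0.1)).keys = class_vals := by
    rw [PySem.Dict.keys_foldl_modify_key filtered gC 0 (fun _ row n => n + 1) inner0.1]
    have : inner0.1.keys = class_vals := by simp [hinner0, PySem.Dict.keys, Function.comp_def]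
    rw [this]
    refine pv_update_of_subset _ _ (fun x hx => ?_)
    obtain ⟨row, hrow, rfl⟩ := List.mem_map.mp hx
    have : row ∈ instances := List.mem_of_mem_filter hrow
    simpa [hcv] using (PySem.Set.mem_ofList (instances.map gC) (gC row)).mpr (List.mem_map_of_mem this)
  have hinnd : ((filtered.foldl (fun dc row => dc.modify (gC row) 0 (· + 1)) inner0.1)).keys.Nodup := by
    rw [hinkeys]; exact PySem.Set.nodup_ofList _
  have hinitems : ((filtered.foldl (fun dc row => dc.modify (gC row) 0 (· + 1)) inner0.1)).items
      = class_vals.map (fun c => (c, (filtered.countP (fun row => gC row == c) : Int))) := by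
    rw [PySem.Dict.items_eq_map_keys _ hinnd 0, hinkeys]
    apply List.map_congr_left
    intro c _
    have hstep : (filtered.foldl (fun dc row => dc.modify (gC row) 0 (· + 1)) inner0.1).getD c 0
        = inner0.1.getD c 0 + (List.count c (filtered.map gC) : Int) := by
      have h1 := PySem.Dict.getD_foldl_modify_add_one (filtered.map gC) inner0.1 c
      rw [List.foldl_map] at h1
      exact h1
    have h0 : inner0.1.getD c 0 = 0 := pv_getD_const _ _ _
    rw [hstep, h0, pv_count_map filtered gC c, zero_add]
  rw [hvval]
  simp only [hinitems]
  have hcnt : ∀ c : String, (filtered.countP (fun row => gC row == c) : Int)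
      = (instances.countP (fun row => gA row == v && gC row == c) : Int) := by
    intro c
    rw [hfil, List.countP_filter]
    congr 2
    funext a
    rw [Bool.and_comm]
  have hlen : ((0 : Int) + filtered.length) = (instances.countP (fun row => gA row == v) : Int) := by
    rw [hfil, ← List.countP_eq_length_filter, zero_add]
  simp only [hlen, hgA, hgC, pvGetS]
  simp only [Prod.mk.injEq, true_and]
  refine ⟨?_, trivial⟩
  apply List.map_congr_left
  intro c _
  simp only [Prod.mk.injEq, true_and]
  have h := hcnt c
  simp only [hgA, hgC, pvGetS] at h
  exact h
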